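-- pv_equiv track=rewrite | github.com/joaobalieiro/ComputacaoGraficaRender | ui.py | hit_test
-- ===== SOURCE A (Python) =====
-- from typing import Tuple, Optional
--
-- OBJECT_BUTTONS = [
--     ("cube", "Cubo"),
--     ("pyramid", "Piramide"),
--     ("cylinder", "Cilindro"),
--     ("sphere", "Esfera"),
-- ]
--
-- SHADING_BUTTONS = [
--     ("flat", "Flat"),
--     ("gouraud", "Gouraud"),
--     ("phong", "Phong"),
-- ]
--
-- def _object_button_rects(width: int, height: int):
--     margin = 10
--     btn_w = 110
--     btn_h = 30
--     gap = 10
--     # primeira linha (topo) para objetos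
--     y = height - margin - btn_h
--     rects = []
--     for i, (oid, _) in enumerate(OBJECT_BUTTONS):
--         x = margin + i * (btn_w + gap)
--         rects.append((oid, x, y, x + btn_w, y + btn_h))
--     return rects
--
-- def _shading_button_rects(width: int, height: int):
--     margin = 10
--     btn_w = 110
--     btn_h = 30
--     gap = 10
--     # segunda linha para modelos de iluminacao
--     y = height - 2 * margin - 2 * btn_h
--     rects = []
--     for i, (sid, _) in enumerate(SHADING_BUTTONS):
--         x = margin + i * (btn_w + gap)
--         rects.append((sid, x, y, x + btn_w, y + btn_h))
--     return rects
--
-- def hit_test(x: int, y: int, width: int, height: int) -> Tuple[Optional[str], Optional[str]]: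
--     # Retorna ("object", id) ou ("shading", id) se clicou em algum botao
--     # GLUT fornece y com origem no topo; nossa UI usa origem em baixo
--     y_gl = height - y
--
--     # testa botoes de objeto
--     for oid, x0, y0, x1, y1 in _object_button_rects(width, height):
--         if x0 <= x <= x1 and y0 <= y_gl <= y1:
--             return "object", oid
--
--     # testa botoes de shading
--     for sid, x0, y0, x1, y1 in _shading_button_rects(width, height):
--         if x0 <= x <= x1 and y0 <= y_gl <= y1:
--             return "shading", sid
--
--     return None, None
-- ===== SOURCE B (Python) =====
-- OBJECT_IDS = ["cube", "pyramid", "cylinder", "sphere"]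
-- SHADING_IDS = ["flat", "gouraud", "phong"]
--
-- def hit_test(x, y, width, height):
--     # Buttons sit on a 120px pitch starting at x=10, each 110 wide;
--     # the two rows correspond (after the GL flip) to y in [10,40] and [50,80].
--     if x < 10 or (x - 10) % 120 > 110:
--         return None, None
--     i = (x - 10) // 120
--     if i < 4 and 10 <= y <= 40:
--         return "object", OBJECT_IDS[i]
--     if i < 3 and 50 <= y <= 80:
--         return "shading", SHADING_IDS[i]
--     return None, None
-- ===== Notes on version B (the rewrite author's own statement) =====
-- stated objective: simpler
-- what changed: Replaced the two rect-building helpers and their per-button scan loops by O(1) arithmetic: a 120px-pitch column index from divmod on x plus two fixed y-range checks (height cancels out of the row test).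
import Mathlib
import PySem

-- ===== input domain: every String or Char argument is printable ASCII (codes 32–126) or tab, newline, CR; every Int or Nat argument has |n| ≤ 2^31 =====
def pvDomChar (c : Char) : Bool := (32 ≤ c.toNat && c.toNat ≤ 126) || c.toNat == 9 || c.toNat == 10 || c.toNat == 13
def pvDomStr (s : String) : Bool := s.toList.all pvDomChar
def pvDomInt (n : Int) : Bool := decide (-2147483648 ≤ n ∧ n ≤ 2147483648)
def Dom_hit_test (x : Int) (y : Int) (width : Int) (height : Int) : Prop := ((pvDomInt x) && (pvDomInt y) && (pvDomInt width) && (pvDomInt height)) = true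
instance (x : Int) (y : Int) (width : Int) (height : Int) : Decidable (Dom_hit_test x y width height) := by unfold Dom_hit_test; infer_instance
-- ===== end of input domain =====

-- B replaces the two per-button scan loops by O(1) column arithmetic ((x-10) divmod 120) plus two fixed row checks (simpler, constant-time).


-- ===== PORT A =====
def OBJECT_BUTTONS : List (String × String) :=
  [("cube", "Cubo"), ("pyramid", "Piramide"), ("cylinder", "Cilindro"), ("sphere", "Esfera")]

def SHADING_BUTTONS : List (String × String) :=
  [("flat", "Flat"), ("gouraud", "Gouraud"), ("phong", "Phong")]

def object_button_rects (_width height : Int) : List (String × Int × Int × Int × Int) :=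
  let margin : Int := 10
  let btn_w : Int := 110
  let btn_h : Int := 30
  let gap : Int := 10
  let y := height - margin - btn_h
  (PySem.List.enumerate OBJECT_BUTTONS).foldl
    (fun rects p =>
      let x := margin + p.1 * (btn_w + gap)
      rects ++ [(p.2.1, x, y, x + btn_w, y + btn_h)]) []

def shading_button_rects (_width height : Int) : List (String × Int × Int × Int × Int) :=
  let margin : Int := 10
  let btn_w : Int := 110
  let btn_h : Int := 30
  let gap : Int := 10
  let y := height - 2 * margin - 2 * btn_h
  (PySem.List.enumerate SHADING_BUTTONS).foldl
    (fun rects p =>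
      let x := margin + p.1 * (btn_w + gap)
      rects ++ [(p.2.1, x, y, x + btn_w, y + btn_h)]) []

-- the 'for … if …: return' loop: first rect containing the point, if any
def scan_rects (tag : String) (x y_gl : Int) : List (String × Int × Int × Int × Int) → Option (Option String × Option String)
  | [] => none
  | (bid, x0, y0, x1, y1) :: rest =>
      if x0 ≤ x ∧ x ≤ x1 ∧ y0 ≤ y_gl ∧ y_gl ≤ y1 then some (some tag, some bid)
      else scan_rects tag x y_gl rest

def hit_test (x : Int) (y : Int) (width : Int) (height : Int) : Option String × Option String :=
  let y_gl := height - y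
  match scan_rects "object" x y_gl (object_button_rects width height) with
  | some r => r
  | none =>
    match scan_rects "shading" x y_gl (shading_button_rects width height) with
    | some r => r
    | none => (none, none)

-- ===== PORT B =====
def OBJECT_IDS : List String := ["cube", "pyramid", "cylinder", "sphere"]
def SHADING_IDS : List String := ["flat", "gouraud", "phong"]

def hit_test_alt (x : Int) (y : Int) (_width : Int) (_height : Int) : Option String × Option String :=
  if x < 10 ∨ 110 < PySem.Int.mod (x - 10) 120 then (none, none)
  else
    let i := PySem.Int.floordiv (x - 10) 120
    if i < 4 ∧ 10 ≤ y ∧ y ≤ 40 then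
      -- OBJECT_IDS[i]: the guard i < 4 (with 0 ≤ i from the divmod) keeps it in range
      match PySem.List.pyGet? OBJECT_IDS i with
      | some s => (some "object", some s)
      | none => (none, none)
    else if i < 3 ∧ 50 ≤ y ∧ y ≤ 80 then
      match PySem.List.pyGet? SHADING_IDS i with
      | some s => (some "shading", some s)
      | none => (none, none)
    else (none, none)

-- ===== PRECONDITION & SPEC =====
def Spec_hit_test (x : Int) (y : Int) (width : Int) (height : Int) (out : Option String × Option String) : Prop := out = hit_test_alt x y width height
instance (x : Int) (y : Int) (width : Int) (height : Int) (out : Option String × Option String) : Decidable (Spec_hit_test x y width height out) := by unfold Spec_hit_test; infer_instance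

-- ===== CLAIM (what is proved, stated in full; the proofs are below) =====
def Claim_equal_hit_test : Prop := ∀ (x : Int) (y : Int) (width : Int) (height : Int), Dom_hit_test x y width height → Spec_hit_test x y width height (hit_test x y width height)

-- ===== LEMMAS AND PROOFS =====


-- ===== VERDICT (by name: the statement is the Claim_ definition above) =====
theorem hit_test_spec : Claim_equal_hit_test := by
  intro x y w h _
  unfold Spec_hit_test
  have h120 : (0:Int) < 120 := by norm_num
  simp only [hit_test, hit_test_alt, object_button_rects, shading_button_rects,
    OBJECT_BUTTONS, SHADING_BUTTONS, OBJECT_IDS, SHADING_IDS,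
    PySem.List.enumerate_cons, PySem.List.enumerate_nil, List.foldl, scan_rects,
    PySem.Int.mod_eq_emod_of_pos h120, PySem.Int.floordiv_eq_ediv_of_pos h120,
    List.nil_append, List.cons_append]
  norm_num
  split_ifs <;>
    first
      | rfl
      | omega
      | (rw [show (x-10)/120 = 0 from by omega]; rfl)
      | (rw [show (x-10)/120 = 1 from by omega]; rfl)
      | (rw [show (x-10)/120 = 2 from by omega]; rfl)
      | (rw [show (x-10)/120 = 3 from by omega]; rfl)
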